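-- pv_equiv track=rewrite | github.com/mliu01/transformer-project | HierarchicalClassificationHead.py | initialize_paths_per_lvl
-- ===== SOURCE A (Python) =====
-- def initialize_paths_per_lvl(paths):
--     length = max([len(path) for path in paths])
--     paths_per_lvl = {}
--     for i in range(length):
--         added_paths = set()
--         paths_per_lvl[i+1] = []
--         for path in paths:
--             # try:
--             #     path[i+1]
--             # except IndexError:
--             #     continue
--             new_path = path[:i+1]
--             new_tuple = tuple(new_path)
--             if not (new_tuple in added_paths):
--                 added_paths.add(new_tuple)
--                 paths_per_lvl[i+1].append(new_path)
--
--     return paths_per_lvl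
-- ===== SOURCE B (Python) =====
-- def initialize_paths_per_lvl(paths):
--     length = max([len(path) for path in paths])
--     levels = []
--     cur = [tuple(path) for path in paths]
--     for lvl in range(length, 0, -1):
--         # level lvl = ordered dedup of length-lvl truncations; refining the already
--         # deduped level lvl+1 list gives the same first-occurrence order as scanning paths
--         cur = list(dict.fromkeys(t[:lvl] for t in cur))
--         levels.append((lvl, [list(t) for t in cur]))
--     return dict(reversed(levels))
-- ===== Notes on version B (the rewrite author's own statement) =====
-- stated objective: alternative
-- what changed: Instead of re-scanning all n paths with a fresh seen-set for every level, B computes levels top-down: level lvl is the ordered dedup (dict.fromkeys) of the length-lvl truncations of the already-deduped level lvl+1 list, so each level scans only the previous deduped level instead of the full path list.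
-- outside the precondition, e.g. on initialize_paths_per_lvl([]): A raises ValueError, B raises ValueError
import Mathlib
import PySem

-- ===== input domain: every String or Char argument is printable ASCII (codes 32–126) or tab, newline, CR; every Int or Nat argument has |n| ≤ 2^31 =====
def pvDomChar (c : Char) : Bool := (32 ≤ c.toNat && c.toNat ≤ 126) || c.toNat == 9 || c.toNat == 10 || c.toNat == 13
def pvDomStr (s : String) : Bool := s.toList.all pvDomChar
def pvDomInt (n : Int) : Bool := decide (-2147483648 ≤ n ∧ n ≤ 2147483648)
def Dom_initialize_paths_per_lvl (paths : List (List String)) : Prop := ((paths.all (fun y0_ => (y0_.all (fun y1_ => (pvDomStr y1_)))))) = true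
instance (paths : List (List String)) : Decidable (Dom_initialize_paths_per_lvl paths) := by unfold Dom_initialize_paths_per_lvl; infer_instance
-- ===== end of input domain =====

-- B derives each level from the previous deduped level instead of re-scanning all paths per level.

-- ===== PORT A =====
-- max([...]) raises ValueError on paths = []; Pre_ excludes that input, so the getD default is never used
def initialize_paths_per_lvl (paths : List (List String)) : List (Int × List (List String)) :=
  let length := (PySem.List.max? (paths.map (fun path => (path.length : Int))) (fun x => x)).getD 0
  let paths_per_lvl := (PySem.List.pyRange 0 length 1).foldl (fun paths_per_lvl i =>
      -- added_paths = set(); paths_per_lvl[i+1] = []; the inner loop appends only at key i+1,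
      -- so the growing list is carried in the fold state and inserted once at the end
      let st := paths.foldl
        (fun (st : PySem.Set (List String) × List (List String)) path =>
          let new_path := PySem.List.slice path none (some (i+1))
          if PySem.Set.contains st.1 new_path then st
          else (PySem.Set.add st.1 new_path, st.2 ++ [new_path]))
        ((PySem.Set.empty : PySem.Set (List String)), ([] : List (List String)))
      paths_per_lvl.insert (i+1) st.2)
    (PySem.Dict.empty : PySem.Dict Int (List (List String)))
  paths_per_lvl.items

-- ===== PORT B =====
-- the Python tuple(path)/list(t) conversions (hashability only) are identities here;
-- dict.fromkeys ordered dedup is PySem.List.dedup; dict(reversed(levels)) over the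
-- pairwise-distinct keys lvl is the reversed association list
def initialize_paths_per_lvl_alt (paths : List (List String)) : List (Int × List (List String)) :=
  let length := (PySem.List.max? (paths.map (fun path => (path.length : Int))) (fun x => x)).getD 0
  let st := (PySem.List.pyRange length 0 (-1)).foldl
    (fun (st : List (List String) × List (Int × List (List String))) lvl =>
      let cur := PySem.List.dedup (st.1.map (fun t => PySem.List.slice t none (some lvl)))
      (cur, st.2 ++ [(lvl, cur)]))
    (paths, [])
  st.2.reverse

-- ===== PRECONDITION & SPEC =====
-- Pre_ excludes only paths = [], on which A (and B) raise ValueError from max([])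
def Pre_initialize_paths_per_lvl (paths : List (List String)) : Prop := paths ≠ []
instance (paths : List (List String)) : Decidable (Pre_initialize_paths_per_lvl paths) := by unfold Pre_initialize_paths_per_lvl; infer_instance
def pvWitness_initialize_paths_per_lvl : List (List String) := [["a", "b"], ["a", "c"], ["a", "b"]]

def Spec_initialize_paths_per_lvl (paths : List (List String)) (out : List (Int × List (List String))) : Prop := out = initialize_paths_per_lvl_alt paths
instance (paths : List (List String)) (out : List (Int × List (List String))) : Decidable (Spec_initialize_paths_per_lvl paths out) := by unfold Spec_initialize_paths_per_lvl; infer_instance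

-- ===== CLAIM (what is proved, stated in full; the proofs are below) =====
def Claim_equal_initialize_paths_per_lvl : Prop := ∀ (paths : List (List String)), Dom_initialize_paths_per_lvl paths → Pre_initialize_paths_per_lvl paths → Spec_initialize_paths_per_lvl paths (initialize_paths_per_lvl paths)

-- ===== LEMMAS AND PROOFS =====

-- the common value of each level: ordered dedup of the length-j prefixes of paths
def pvSL (paths : List (List String)) (j : Nat) : List (List String) :=
  PySem.List.dedup (paths.map (fun p => p.take j))

-- the levels list B builds, descending from n to 1
def pvDesc (paths : List (List String)) : Nat → List (Int × List (List String))
  | 0 => []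
  | n+1 => (((n : Int) + 1), pvSL paths (n+1)) :: pvDesc paths n

-- dedup with an explicit seen-prefix s (the part of Set.update past s)
def pvDD (s : List (List String)) : List (List String) → List (List String)
  | [] => []
  | x :: xs => if x ∈ s then pvDD s xs else x :: pvDD (s ++ [x]) xs

theorem pvUpdate_eq_pvDD : ∀ (ys : List (List String)) (s : PySem.Set (List String)),
    PySem.Set.update s ys = s ++ pvDD s ys := by
  intro ys
  induction ys with
  | nil => intro s; simp [PySem.Set.update_nil, pvDD]
  | cons y ys ih =>
    intro s
    rw [PySem.Set.update_cons, PySem.Set.add_eq_ite]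
    by_cases h : y ∈ s
    · simp [pvDD, h, ih]
    · simp [pvDD, h, ih (s ++ [y])]

theorem pvDedup_eq_pvDD (xs : List (List String)) : PySem.List.dedup xs = pvDD [] xs := by
  have h := pvUpdate_eq_pvDD xs []
  rw [PySem.Set.update_nil_left] at h
  simpa [PySem.List.dedup_eq_ofList] using h

theorem pvDD_map_pvDD (f : List String → List String) :
    ∀ (ys : List (List String)) (s t : List (List String)),
      (∀ y ∈ t, f y ∈ s) → pvDD s ((pvDD t ys).map f) = pvDD s (ys.map f) := by
  intro ys
  induction ys with
  | nil => intro s t _; simp [pvDD]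
  | cons y ys ih =>
    intro s t hst
    by_cases hy : y ∈ t
    · simp only [pvDD, List.map_cons, hy, if_true]
      have : f y ∈ s := hst y hy
      rw [ih s t hst]
      simp [this]
    · simp only [pvDD, List.map_cons, hy, if_false]
      by_cases hf : f y ∈ s
      · simp only [hf, if_true]
        exact ih s (t ++ [y]) (by
          intro z hz
          rcases List.mem_append.mp hz with h | h
          · exact hst z h
          · simp at h; subst h; exact hf)
      · simp only [hf, if_false]
        congr 1
        exact ih (s ++ [f y]) (t ++ [y]) (by
          intro z hz
          rcases List.mem_append.mp hz with h | h
          · exact List.mem_append_left _ (hst z h)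
          · simp at h; subst h; simp)

theorem pvDedup_map_dedup (f : List String → List String) (ys : List (List String)) :
    PySem.List.dedup ((PySem.List.dedup ys).map f) = PySem.List.dedup (ys.map f) := by
  rw [pvDedup_eq_pvDD, pvDedup_eq_pvDD (ys.map f), pvDedup_eq_pvDD ys]
  exact pvDD_map_pvDD f ys [] [] (by simp)

-- A's inner loop: seen set and output list stay equal, so the result is Set.update
theorem pvPairFold (f : List String → List String) :
    ∀ (xs : List (List String)) (s : PySem.Set (List String)),
      xs.foldl
        (fun (st : PySem.Set (List String) × List (List String)) path =>
          let new_path := f path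
          if PySem.Set.contains st.1 new_path then st
          else (PySem.Set.add st.1 new_path, st.2 ++ [new_path]))
        (s, s)
      = (PySem.Set.update s (xs.map f), PySem.Set.update s (xs.map f)) := by
  intro xs
  induction xs with
  | nil => intro s; simp [PySem.Set.update_nil]
  | cons x xs ih =>
    intro s
    rw [List.foldl_cons]
    by_cases h : f x ∈ s
    · have hc : PySem.Set.contains s (f x) = true := (PySem.Set.contains_iff s (f x)).mpr h
      simp only [hc, if_true]
      rw [ih s]
      rw [List.map_cons, PySem.Set.update_cons, PySem.Set.add_of_mem h]
    · have hc : PySem.Set.contains s (f x) = false := by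
        by_contra hne
        exact h ((PySem.Set.contains_iff s (f x)).mp (by simpa using hne))
      simp only [hc, if_false, Bool.false_eq_true]
      rw [PySem.Set.add_of_not_mem h, ih (s ++ [f x])]
      rw [List.map_cons, PySem.Set.update_cons, PySem.Set.add_of_not_mem h]

theorem pvALevel (paths : List (List String)) (f : List String → List String) :
    (paths.foldl
        (fun (st : PySem.Set (List String) × List (List String)) path =>
          let new_path := f path
          if PySem.Set.contains st.1 new_path then st
          else (PySem.Set.add st.1 new_path, st.2 ++ [new_path]))
        ((PySem.Set.empty : PySem.Set (List String)), ([] : List (List String)))).2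
      = PySem.List.dedup (paths.map f) := by
  have h := pvPairFold f paths []
  rw [show ((PySem.Set.empty : PySem.Set (List String)), ([] : List (List String)))
        = (([] : PySem.Set (List String)), ([] : List (List String))) from rfl]
  rw [h, PySem.Set.update_nil_left, PySem.List.dedup_eq_ofList]

-- B's fold invariant: if cur refines paths at all levels ≤ n, the fold emits the levels n..1
theorem pvBFold (paths : List (List String)) :
    ∀ (n : Nat) (cur : List (List String)) (acc : List (Int × List (List String))),
      (∀ j : Nat, j ≤ n → PySem.List.dedup (cur.map (fun p => p.take j)) = pvSL paths j) →
      ((PySem.List.pyRange (n : Int) 0 (-1)).foldl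
          (fun (st : List (List String) × List (Int × List (List String))) lvl =>
            let cur := PySem.List.dedup (st.1.map (fun t => PySem.List.slice t none (some lvl)))
            (cur, st.2 ++ [(lvl, cur)]))
          (cur, acc)).2
        = acc ++ pvDesc paths n := by
  intro n
  induction n with
  | zero => intro cur acc _; rw [PySem.List.pyRange_neg_one_eq_nil (by norm_num)]; simp [pvDesc]
  | succ n ih =>
    intro cur acc hinv
    rw [PySem.List.pyRange_neg_one_cons (by exact_mod_cast Nat.succ_pos n)]
    rw [List.foldl_cons]
    have hslice : ∀ t : List String,
        PySem.List.slice t none (some (((n + 1 : Nat) : Int))) = t.take (n + 1) :=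
      fun t => PySem.List.slice_to_natCast t (n + 1)
    simp only [hslice]
    have hcur : PySem.List.dedup (cur.map (fun t => t.take (n + 1))) = pvSL paths (n + 1) :=
      hinv (n + 1) le_rfl
    have hcast : (((n + 1 : Nat) : Int)) - 1 = (n : Int) := by push_cast; ring
    rw [hcast]
    rw [ih (PySem.List.dedup (cur.map (fun t => t.take (n + 1)))) _ (by
      intro j hj
      rw [pvDedup_map_dedup]
      rw [List.map_map]
      have : ((fun p => List.take j p) ∘ fun t => t.take (n + 1)) = (fun p : List String => p.take j) := by
        funext p
        simp [List.take_take, Nat.min_eq_left (Nat.le_succ_of_le hj)]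
      rw [this]
      exact hinv j (Nat.le_succ_of_le hj))]
    rw [hcur]
    simp [pvDesc, List.append_assoc]

-- the descending levels list reversed is the ascending one A builds
theorem pvDesc_reverse (paths : List (List String)) :
    ∀ n : Nat, (pvDesc paths n).reverse
      = (List.range n).map (fun k => (((k + 1 : Nat) : Int), pvSL paths (k+1))) := by
  intro n
  induction n with
  | zero => simp [pvDesc]
  | succ n ih => rw [pvDesc, List.reverse_cons, ih, List.range_succ]; simp

-- ===== VERDICT (by name: the statement is the Claim_ definition above) =====
theorem initialize_paths_per_lvl_spec : Claim_equal_initialize_paths_per_lvl := by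
  intro paths _ hpre
  have hpre' : paths ≠ [] := hpre
  show initialize_paths_per_lvl paths = initialize_paths_per_lvl_alt paths
  unfold initialize_paths_per_lvl initialize_paths_per_lvl_alt
  simp only []
  set L := (PySem.List.max? (paths.map (fun path => (path.length : Int))) (fun x => x)).getD 0 with hLdef
  -- the maximum of a nonempty list of lengths is nonnegative
  have hL0 : 0 ≤ L := by
    have hne : paths.map (fun path => (path.length : Int)) ≠ [] := by
      simp only [ne_eq, List.map_eq_nil_iff]; exact hpre'
    cases hmax : PySem.List.max? (paths.map (fun path => (path.length : Int))) (fun x => x) with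
    | none => rw [PySem.List.max?_eq_none_iff] at hmax; exact absurd hmax hne
    | some m =>
      have hmem := PySem.List.max?_mem hmax
      rw [hLdef, hmax]
      obtain ⟨q, _, hq⟩ := List.mem_map.mp hmem
      simp [← hq]
  -- A side: the outer fold inserts the fresh keys i+1 in range order
  have hA := PySem.Dict.items_foldl_insert_fresh
      (l := PySem.List.pyRange 0 L 1) (k := fun i => i + 1)
      (v := fun i => (paths.foldl
        (fun (st : PySem.Set (List String) × List (List String)) path =>
          let new_path := PySem.List.slice path none (some (i+1))
          if PySem.Set.contains st.1 new_path then st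
          else (PySem.Set.add st.1 new_path, st.2 ++ [new_path]))
        ((PySem.Set.empty : PySem.Set (List String)), ([] : List (List String)))).2)
      (d := PySem.Dict.empty)
      (by intro a _; simp)
      ((PySem.List.nodup_pyRange_one 0 L).map (add_left_injective 1))
  rw [hA]
  have hemp : (PySem.Dict.empty : PySem.Dict Int (List (List String))).items = [] := rfl
  rw [hemp, List.nil_append]
  -- B side
  rw [show L = ((L.toNat : Nat) : Int) from (Int.toNat_of_nonneg hL0).symm]
  rw [pvBFold paths L.toNat paths [] (by intro j _; rfl)]
  rw [List.nil_append, pvDesc_reverse]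
  -- both sides are now maps over List.range L.toNat
  rw [PySem.List.pyRange_one, List.map_map]
  simp only [Int.sub_zero, Int.toNat_natCast]
  apply List.map_congr_left
  intro k _
  simp only [Function.comp_apply, zero_add]
  rw [Prod.mk.injEq]
  refine ⟨by push_cast; ring, ?_⟩
  have hslice : ∀ p : List String,
      PySem.List.slice p none (some ((k : Int) + 1)) = p.take (k + 1) := by
    intro p
    have := PySem.List.slice_to_natCast p (k + 1)
    push_cast at this
    exact this
  simp only [hslice]
  show _ = pvSL paths (k + 1)
  exact pvALevel paths (fun p => p.take (k + 1))
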